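-- pv_equiv track=rewrite | github.com/parasiitism/AlgoDaily | leetcode/1401/main.py | bsearch_right
-- ===== SOURCE A (Python) =====
-- def bsearch_right(left, right, xCenter, yCenter, y, r):
--     while left < right:
--         mid = (left + right) // 2
--         if (mid - xCenter)**2 + (y - yCenter)**2 > r**2:
--             right = mid
--         else:
--             left = mid + 1
--     return left
-- ===== SOURCE B (Python) =====
-- def bsearch_right(left, right, xCenter, yCenter, y, r):
--     # recursive divide-and-conquer with dy^2 and r^2 precomputed once (simpler decomposition)
--     dy2 = (y - yCenter) ** 2
--     rr = r ** 2
--     def go(lo, hi):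
--         if lo >= hi:
--             return lo
--         mid = (lo + hi) // 2
--         if (mid - xCenter) ** 2 + dy2 > rr:
--             return go(lo, mid)
--         return go(mid + 1, hi)
--     return go(left, right)
-- ===== Notes on version B (the rewrite author's own statement) =====
-- stated objective: simpler
-- what changed: The while-loop with mutable left/right is rewritten as a recursive divide-and-conquer helper, with the invariant quantities dy^2 and r^2 hoisted out of the loop and computed once.
import Mathlib
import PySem

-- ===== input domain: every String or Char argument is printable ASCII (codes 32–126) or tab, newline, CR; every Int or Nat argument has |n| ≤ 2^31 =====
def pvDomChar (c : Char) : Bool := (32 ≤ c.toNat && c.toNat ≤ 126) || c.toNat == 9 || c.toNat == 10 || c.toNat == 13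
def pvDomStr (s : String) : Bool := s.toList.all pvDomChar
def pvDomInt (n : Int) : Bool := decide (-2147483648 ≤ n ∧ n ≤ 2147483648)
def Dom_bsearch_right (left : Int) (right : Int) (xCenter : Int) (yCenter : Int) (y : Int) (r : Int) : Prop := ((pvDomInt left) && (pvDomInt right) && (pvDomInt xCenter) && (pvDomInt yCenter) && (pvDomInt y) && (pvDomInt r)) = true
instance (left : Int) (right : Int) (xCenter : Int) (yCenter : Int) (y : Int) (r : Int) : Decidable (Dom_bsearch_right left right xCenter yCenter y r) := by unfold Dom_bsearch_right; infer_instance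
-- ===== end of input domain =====

-- B rewrites A's while-loop as a recursive divide-and-conquer helper with dy^2 and r^2 hoisted out; objective: simpler.


-- ===== PORT A =====
-- the while-loop of A, as structural recursion on the shrinking interval width
def bsearch_right (left : Int) (right : Int) (xCenter : Int) (yCenter : Int) (y : Int) (r : Int) : Int :=
  if h : left < right then
    let mid := PySem.Int.floordiv (left + right) 2
    if (mid - xCenter) ^ 2 + (y - yCenter) ^ 2 > r ^ 2 then
      bsearch_right left mid xCenter yCenter y r
    else
      bsearch_right (mid + 1) right xCenter yCenter y r
  else
    left
termination_by (right - left).toNat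
decreasing_by
  all_goals
    simp only [PySem.Int.floordiv_eq_ediv_of_pos (by omega : (0:Int) < 2)]
    omega

-- ===== PORT B =====
-- B's inner recursive helper 'go' (dy2, rr, xCenter are the captured constants)
def bsearchGo (xCenter : Int) (dy2 : Int) (rr : Int) (lo : Int) (hi : Int) : Int :=
  if h : lo ≥ hi then lo
  else
    let mid := PySem.Int.floordiv (lo + hi) 2
    if (mid - xCenter) ^ 2 + dy2 > rr then bsearchGo xCenter dy2 rr lo mid
    else bsearchGo xCenter dy2 rr (mid + 1) hi
termination_by (hi - lo).toNat
decreasing_by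
  all_goals
    simp only [PySem.Int.floordiv_eq_ediv_of_pos (by omega : (0:Int) < 2)]
    omega

def bsearch_right_alt (left : Int) (right : Int) (xCenter : Int) (yCenter : Int) (y : Int) (r : Int) : Int :=
  bsearchGo xCenter ((y - yCenter) ^ 2) (r ^ 2) left right

-- ===== PRECONDITION & SPEC =====
def Spec_bsearch_right (left : Int) (right : Int) (xCenter : Int) (yCenter : Int) (y : Int) (r : Int) (out : Int) : Prop := out = bsearch_right_alt left right xCenter yCenter y r
instance (left : Int) (right : Int) (xCenter : Int) (yCenter : Int) (y : Int) (r : Int) (out : Int) : Decidable (Spec_bsearch_right left right xCenter yCenter y r out) := by unfold Spec_bsearch_right; infer_instance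

-- ===== CLAIM (what is proved, stated in full; the proofs are below) =====
def Claim_equal_bsearch_right : Prop := ∀ (left : Int) (right : Int) (xCenter : Int) (yCenter : Int) (y : Int) (r : Int), Dom_bsearch_right left right xCenter yCenter y r → Spec_bsearch_right left right xCenter yCenter y r (bsearch_right left right xCenter yCenter y r)

-- ===== LEMMAS AND PROOFS =====
theorem bsearch_right_eq_go (left right xCenter yCenter y r : Int) :
    bsearch_right left right xCenter yCenter y r
      = bsearchGo xCenter ((y - yCenter) ^ 2) (r ^ 2) left right := by
  fun_induction bsearch_right left right xCenter yCenter y r with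
  | case1 left right h mid hcond ih =>
      rw [bsearchGo]; simp only [show ¬ left ≥ right by omega, dite_false]
      rw [if_pos hcond]; exact ih
  | case2 left right h mid hcond ih =>
      rw [bsearchGo]; simp only [show ¬ left ≥ right by omega, dite_false]
      rw [if_neg hcond]; exact ih
  | case3 left right h =>
      rw [bsearchGo]; simp only [show left ≥ right by omega, dite_true]

-- ===== VERDICT (by name: the statement is the Claim_ definition above) =====
theorem bsearch_right_spec : Claim_equal_bsearch_right := by
  intro left right xCenter yCenter y r _
  unfold Spec_bsearch_right bsearch_right_alt
  exact bsearch_right_eq_go left right xCenter yCenter y r
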